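-- pv_equiv track=rewrite | github.com/amoljewalikar/code-optimus_prime | string_remove.py | string_remove
-- ===== SOURCE A (Python) =====
-- def string_remove(s):
--     r = ''
--     for i in range(len(s)):
--         if i == 5:
--             r += s[i].upper()
--         else:
--             r += s[i]
--     return r[3:]
-- ===== SOURCE B (Python) =====
-- def string_remove(s):
--     if len(s) > 5:
--         r = s[:5] + s[5].upper() + s[6:]
--     else:
--         r = s
--     return r[3:]
-- ===== Notes on version B (the rewrite author's own statement) =====
-- stated objective: simpler
-- what changed: Replaces the char-by-char index loop that rebuilds the whole string by repeated concatenation with a single direct slice construction (prefix + uppercased char at 5 + suffix, guarded by length).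
import Mathlib
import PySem

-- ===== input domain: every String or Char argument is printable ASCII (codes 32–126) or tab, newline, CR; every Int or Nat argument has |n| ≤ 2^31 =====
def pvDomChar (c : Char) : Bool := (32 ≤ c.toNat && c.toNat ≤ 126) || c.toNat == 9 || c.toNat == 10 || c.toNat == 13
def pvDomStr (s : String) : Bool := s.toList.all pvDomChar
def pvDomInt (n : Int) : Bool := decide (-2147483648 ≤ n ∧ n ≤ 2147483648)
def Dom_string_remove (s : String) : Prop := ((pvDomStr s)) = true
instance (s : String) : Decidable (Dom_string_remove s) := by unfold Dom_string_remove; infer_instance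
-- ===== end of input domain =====

-- B replaces A's char-by-char rebuilding loop with one direct slice construction (simpler, no loop).

-- ===== PORT A =====
def string_remove (s : String) : String :=
  let cs := s.toList
  let r := (PySem.List.pyRange 0 (cs.length : Int) 1).foldl
    (fun r i =>
      if i == 5 then r ++ [PySem.Chars.upperChar (PySem.List.pyGetD cs i ' ')]
      else r ++ [PySem.List.pyGetD cs i ' '])
    ([] : List Char)
  String.ofList (PySem.List.slice r (some 3) none)

-- ===== PORT B =====
def string_remove_alt (s : String) : String :=
  let cs := s.toList
  let r :=
    if cs.length > 5 then
      PySem.List.slice cs none (some 5)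
        ++ [PySem.Chars.upperChar (PySem.List.pyGetD cs 5 ' ')]
        ++ PySem.List.slice cs (some 6) none
    else cs
  String.ofList (PySem.List.slice r (some 3) none)

-- ===== PRECONDITION & SPEC =====
def Spec_string_remove (s : String) (out : String) : Prop := out = string_remove_alt s
instance (s : String) (out : String) : Decidable (Spec_string_remove s out) := by unfold Spec_string_remove; infer_instance

-- ===== CLAIM (what is proved, stated in full; the proofs are below) =====
def Claim_equal_string_remove : Prop := ∀ (s : String), Dom_string_remove s → Spec_string_remove s (string_remove s)

-- ===== LEMMAS AND PROOFS =====

-- A's loop produces exactly B's slice construction.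
lemma string_remove_key (cs : List Char) :
    (List.range cs.length).map
      (fun k => if k = 5 then PySem.Chars.upperChar (cs.getD k ' ') else cs.getD k ' ')
    = if cs.length > 5 then
        cs.take 5 ++ [PySem.Chars.upperChar (cs.getD 5 ' ')] ++ cs.drop 6
      else cs := by
  split
  · next h =>
    apply List.ext_getElem
    · simp; omega
    · intro i hi hi'
      simp only [List.getElem_map, List.getElem_range]
      rcases lt_trichotomy i 5 with h5 | h5 | h5
      · rw [List.getElem_append_left (by simp; omega)]
        rw [List.getElem_append_left (by simp; omega)]
        simp only [List.length_map, List.length_range] at hi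
        simp [List.getElem_take, h5.ne, List.getElem?_eq_getElem hi]
      · subst h5
        rw [List.getElem_append_left (by simp; omega)]
        rw [List.getElem_append_right (by simp)]
        simp [List.getElem?_eq_getElem (show (5:ℕ) < cs.length by omega)]
      · rw [List.getElem_append_right (by simp; omega)]
        simp only [List.length_map, List.length_range] at hi
        simp only [List.length_append, List.length_take, List.length_cons, List.length_nil]
        rw [List.getElem_drop]
        simp only [h5.ne', if_false]
        simp only [show 6 + (i - (min 5 cs.length + (0 + 1))) = i from by omega]
        exact List.getD_eq_getElem _ _ hi
  · next h =>
    apply List.ext_getElem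
    · simp
    · intro i hi hi'
      simp only [List.length_map, List.length_range] at hi
      simp [show i ≠ 5 by omega, List.getElem?_eq_getElem hi']

-- ===== VERDICT (by name: the statement is the Claim_ definition above) =====
theorem string_remove_spec : Claim_equal_string_remove := by
  intro s _
  unfold Spec_string_remove string_remove string_remove_alt
  simp only []
  set cs := s.toList with hcs
  have hfold :
      (PySem.List.pyRange 0 (cs.length : Int) 1).foldl
        (fun r i =>
          if i == 5 then r ++ [PySem.Chars.upperChar (PySem.List.pyGetD cs i ' ')]
          else r ++ [PySem.List.pyGetD cs i ' '])
        ([] : List Char)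
      = (List.range cs.length).map
          (fun k => if k = 5 then PySem.Chars.upperChar (cs.getD k ' ') else cs.getD k ' ') := by
    have hf : (fun (r : List Char) (i : Int) =>
          if i == 5 then r ++ [PySem.Chars.upperChar (PySem.List.pyGetD cs i ' ')]
          else r ++ [PySem.List.pyGetD cs i ' '])
        = fun r i => r ++ [if i == 5 then PySem.Chars.upperChar (PySem.List.pyGetD cs i ' ')
                           else PySem.List.pyGetD cs i ' '] := by
      funext r i; split <;> rfl
    rw [hf, PySem.List.foldl_append_singleton_eq_map, PySem.List.pyRange_one]
    simp [List.map_map, Function.comp]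
    intro k _
    by_cases hk : k = 5
    · simp [hk]
    · simp [hk]
      intro hc
      exact absurd (by exact_mod_cast hc) hk
  rw [hfold, string_remove_key]
  congr 2
  split
  · simp [pysem]
  · rfl
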